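-- pv_equiv track=rewrite | github.com/iamprahladk/aoc-2016 | day07/code.py | supports_tls
-- ===== SOURCE A (Python) =====
-- get_sets_of_4_digits = lambda inp: [f'{char}{inp[index+1]}{inp[index+2]}{inp[index+3]}' for index, char in enumerate(inp[:-3])]
--
-- is_abba = lambda inp: True if inp[:2][::-1] == inp[2:] and inp[0] != inp[1] else False
--
-- def get_hypernet_sequences(inp):
--     hypernets = []
--     normal_text = []
--     text = ''
--     for char in inp:
--         if char == '[':
--             normal_text.append(text)
--             text = ''
--         elif char == ']':
--             hypernets.append(text)
--             text = ''
--         else: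
--             text += char
--     normal_text.append(text)
--     return normal_text, hypernets
--
-- def supports_tls(inp):
--     boolean = False
--     normal_text = get_hypernet_sequences(inp)[0]
--     hypernets = get_hypernet_sequences(inp)[1]
--     for text in normal_text:
--         sets = get_sets_of_4_digits(text)
--         for s in sets:
--             if is_abba(s):
--                 boolean = True
--                 break
--     for text in hypernets:
--         sets = get_sets_of_4_digits(text)
--         for s in sets:
--             if is_abba(s):
--                 boolean = False
--                 break
--     return boolean
-- ===== SOURCE B (Python) =====
-- def has_abba(s):
--     return any(s[i] == s[i+3] and s[i+1] == s[i+2] and s[i] != s[i+1]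
--                for i in range(len(s) - 3))
--
-- def supports_tls(inp):
--     super_ok = False
--     seg = ''
--     for ch in inp:
--         if ch == '[':
--             super_ok = super_ok or has_abba(seg)
--             seg = ''
--         elif ch == ']':
--             if has_abba(seg):
--                 return False
--             seg = ''
--         else:
--             seg += ch
--     return super_ok or has_abba(seg)
-- ===== Notes on version B (the rewrite author's own statement) =====
-- stated objective: faster
-- what changed: B replaces A's three-phase pipeline (segment the whole address into two lists, materialise every length-4 substring of every segment, test each with slice-reversal) by a single left-to-right scan that classifies each segment as its terminator appears, checks the abba window by direct indexing without building substrings, and returns False immediately when a hypernet segment contains an abba.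
import Mathlib
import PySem

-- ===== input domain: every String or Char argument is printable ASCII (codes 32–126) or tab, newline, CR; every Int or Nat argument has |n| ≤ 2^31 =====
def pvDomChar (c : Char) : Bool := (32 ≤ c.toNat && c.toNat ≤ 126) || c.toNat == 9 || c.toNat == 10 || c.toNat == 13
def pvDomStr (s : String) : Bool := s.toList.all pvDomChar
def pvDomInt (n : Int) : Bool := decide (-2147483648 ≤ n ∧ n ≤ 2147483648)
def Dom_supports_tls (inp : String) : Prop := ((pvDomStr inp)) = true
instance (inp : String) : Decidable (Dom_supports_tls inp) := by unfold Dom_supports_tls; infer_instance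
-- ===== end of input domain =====

-- B is a single-pass scan with index-based abba checking instead of A's segment-then-substring pipeline; same values, measurably faster by a constant factor (no substring building, early exit).

-- ===== PORT A =====
-- get_sets_of_4_digits: [f'{char}{inp[i+1]}{inp[i+2]}{inp[i+3]}' for i, char in enumerate(inp[:-3])]
-- (indices i+1..i+3 are always in range, so xs[i] is ported with pyGetD)
def getSets4 (inp : List Char) : List (List Char) :=
  (PySem.List.enumerate (PySem.List.slice inp none (some (-3)))).map
    (fun p => [p.2, PySem.List.pyGetD inp (p.1 + 1) ' ',
               PySem.List.pyGetD inp (p.1 + 2) ' ', PySem.List.pyGetD inp (p.1 + 3) ' '])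

-- is_abba: True if inp[:2][::-1] == inp[2:] and inp[0] != inp[1] else False
-- ([::-1] is exactly List.reverse: PySem.List.slice?_none_none_neg_one)
def isAbbaA (s : List Char) : Bool :=
  if (PySem.List.slice s none (some 2)).reverse = PySem.List.slice s (some 2) none ∧
     PySem.List.pyGetD s 0 ' ' ≠ PySem.List.pyGetD s 1 ' ' then true else false

-- get_hypernet_sequences: state (hypernets, normal_text, text), in Python's declaration order
def ghStep (st : List (List Char) × List (List Char) × List Char) (c : Char) :
    List (List Char) × List (List Char) × List Char :=
  if c = '[' then (st.1, st.2.1 ++ [st.2.2], [])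
  else if c = ']' then (st.1 ++ [st.2.2], st.2.1, [])
  else (st.1, st.2.1, st.2.2 ++ [c])

def getHypernetSequences (inp : List Char) : List (List Char) × List (List Char) :=
  let st := inp.foldl ghStep ([], [], [])
  (st.2.1 ++ [st.2.2], st.1)

-- inner 'for s in sets: if is_abba(s): boolean = True; break' (and the False twin)
def innerTrue (b : Bool) : List (List Char) → Bool
  | [] => b
  | s :: rest => if isAbbaA s then true else innerTrue b rest

def innerFalse (b : Bool) : List (List Char) → Bool
  | [] => b
  | s :: rest => if isAbbaA s then false else innerFalse b rest

def supports_tls (inp : String) : Bool :=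
  let normal_text := (getHypernetSequences inp.toList).1
  let hypernets := (getHypernetSequences inp.toList).2
  let b1 := normal_text.foldl (fun b t => innerTrue b (getSets4 t)) false
  hypernets.foldl (fun b t => innerFalse b (getSets4 t)) b1

-- ===== PORT B =====
-- has_abba: any(s[i] == s[i+3] and s[i+1] == s[i+2] and s[i] != s[i+1] for i in range(len(s) - 3))
-- (indices i..i+3 are always in range, so s[i] is ported with pyGetD)
def hasAbba (s : List Char) : Bool :=
  (PySem.List.pyRange 0 ((s.length : Int) - 3) 1).any fun i =>
    decide (PySem.List.pyGetD s i ' ' = PySem.List.pyGetD s (i+3) ' ' ∧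
            PySem.List.pyGetD s (i+1) ' ' = PySem.List.pyGetD s (i+2) ' ' ∧
            PySem.List.pyGetD s i ' ' ≠ PySem.List.pyGetD s (i+1) ' ')

-- the single scan: classify each segment when its terminator appears; ']' segment with abba → early False
def tlsScan (superOk : Bool) (seg : List Char) : List Char → Bool
  | [] => superOk || hasAbba seg
  | c :: rest =>
      if c = '[' then tlsScan (superOk || hasAbba seg) [] rest
      else if c = ']' then (if hasAbba seg then false else tlsScan superOk [] rest)
      else tlsScan superOk (seg ++ [c]) rest

def supports_tls_alt (inp : String) : Bool := tlsScan false [] inp.toList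

-- ===== PRECONDITION & SPEC =====
def Spec_supports_tls (inp : String) (out : Bool) : Prop := out = supports_tls_alt inp
instance (inp : String) (out : Bool) : Decidable (Spec_supports_tls inp out) := by unfold Spec_supports_tls; infer_instance

-- ===== CLAIM (what is proved, stated in full; the proofs are below) =====
def Claim_equal_supports_tls : Prop := ∀ (inp : String), Dom_supports_tls inp → Spec_supports_tls inp (supports_tls inp)

-- ===== LEMMAS AND PROOFS =====

-- the sliding 4-windows of a list (proof-only characterisation of getSets4)
def Q : List Char → List (List Char)
  | a :: b :: c :: d :: r => [a, b, c, d] :: Q (b :: c :: d :: r)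
  | _ => []

theorem short_of_no_window (t : List Char)
    (h : ∀ (a b c d : Char) (r : List Char), t ≠ a :: b :: c :: d :: r) : t.length < 4 := by
  rcases t with _ | ⟨a, _ | ⟨b, _ | ⟨c, _ | ⟨d, r⟩⟩⟩⟩ <;> simp
  exact absurd rfl (h a b c d r)

theorem Q_length (t : List Char) : (Q t).length = t.length - 3 := by
  fun_induction Q t with
  | case1 a b c d r ih => simp [ih]
  | case2 t h => have := short_of_no_window t h; simp; omega

theorem Q_getElem? (t : List Char) : ∀ (k : Nat), k + 3 < t.length →
    (Q t)[k]? = some [t.getD k ' ', t.getD (k+1) ' ', t.getD (k+2) ' ', t.getD (k+3) ' '] := by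
  fun_induction Q t with
  | case1 a b c d r ih =>
      intro k hk
      cases k with
      | zero => simp [List.getD]
      | succ k =>
          have hk' : k + 3 < (b :: c :: d :: r).length := by simp at hk ⊢; omega
          simpa [List.getD] using ih k hk'
  | case2 t h =>
      intro k hk
      have := short_of_no_window t h
      omega

theorem getSets4_length (t : List Char) : (getSets4 t).length = t.length - 3 := by
  unfold getSets4
  rw [PySem.List.slice_to_neg_ofNat t 3 (by norm_num)]
  simp

theorem getSets4_eq_Q (t : List Char) : getSets4 t = Q t := by
  apply List.ext_getElem?
  intro k
  by_cases hk : k + 3 < t.length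
  · rw [Q_getElem? t k hk]
    unfold getSets4
    rw [PySem.List.slice_to_neg_ofNat t 3 (by norm_num)]
    rw [List.getElem?_map, PySem.List.getElem?_enumerate]
    rw [List.getElem?_take_of_lt (by omega : k < t.length - 3)]
    rw [List.getElem?_eq_getElem (by omega : k < t.length)]
    have h1 : ((0:Int) + k) + 1 = ((k+1 : Nat) : Int) := by push_cast; ring
    have h2 : ((0:Int) + k) + 2 = ((k+2 : Nat) : Int) := by push_cast; ring
    have h3 : ((0:Int) + k) + 3 = ((k+3 : Nat) : Int) := by push_cast; ring
    simp only [Option.map_some, h1, h2, h3, PySem.List.pyGetD_natCast]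
    rw [List.getD_eq_getElem t ' ' (by omega : k < t.length)]
  · rw [List.getElem?_eq_none (by rw [getSets4_length]; omega),
        List.getElem?_eq_none (by rw [Q_length]; omega)]

theorem isAbbaA_quad (a b c d : Char) :
    isAbbaA [a, b, c, d] = decide (a = d ∧ b = c ∧ a ≠ b) := by
  unfold isAbbaA
  rw [show PySem.List.slice [a,b,c,d] none (some 2) = [a, b] from rfl,
      show PySem.List.slice [a,b,c,d] (some 2) none = [c, d] from rfl,
      show PySem.List.pyGetD [a,b,c,d] 0 ' ' = a from rfl,
      show PySem.List.pyGetD [a,b,c,d] 1 ' ' = b from rfl]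
  by_cases h1 : a = d <;> by_cases h2 : b = c <;> by_cases h3 : a = b <;>
    simp [h1, h2, h3]

theorem hasAbba_iff (s : List Char) : hasAbba s = true ↔
    ∃ k : Nat, k < s.length - 3 ∧
      (s.getD k ' ' = s.getD (k+3) ' ' ∧ s.getD (k+1) ' ' = s.getD (k+2) ' ' ∧
       s.getD k ' ' ≠ s.getD (k+1) ' ') := by
  unfold hasAbba
  by_cases h3 : 3 ≤ s.length
  · rw [show ((s.length : Int) - 3) = ((s.length - 3 : Nat) : Int) from by omega]
    rw [PySem.List.pyRange_zero_natCast]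
    rw [List.any_map]
    have hfun : ∀ k : Nat,
        (PySem.List.pyGetD s (k : Int) ' ' = PySem.List.pyGetD s ((k : Int)+3) ' ' ∧
         PySem.List.pyGetD s ((k : Int)+1) ' ' = PySem.List.pyGetD s ((k : Int)+2) ' ' ∧
         PySem.List.pyGetD s (k : Int) ' ' ≠ PySem.List.pyGetD s ((k : Int)+1) ' ') ↔
        (s.getD k ' ' = s.getD (k+3) ' ' ∧ s.getD (k+1) ' ' = s.getD (k+2) ' ' ∧
         s.getD k ' ' ≠ s.getD (k+1) ' ') := by
      intro k
      have e1 : ((k : Nat) : Int) + 1 = ((k+1 : Nat) : Int) := by push_cast; ring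
      have e2 : ((k : Nat) : Int) + 2 = ((k+2 : Nat) : Int) := by push_cast; ring
      have e3 : ((k : Nat) : Int) + 3 = ((k+3 : Nat) : Int) := by push_cast; ring
      rw [e1, e2, e3]
      simp only [PySem.List.pyGetD_natCast]
    simp only [List.any_eq_true, List.mem_range, Function.comp_apply, decide_eq_true_eq]
    constructor
    · rintro ⟨k, hk, hc⟩
      exact ⟨k, hk, (hfun k).mp hc⟩
    · rintro ⟨k, hk, hc⟩
      exact ⟨k, hk, (hfun k).mpr hc⟩
  · constructor
    · intro h
      rw [List.any_eq_true] at h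
      obtain ⟨i, hi, -⟩ := h
      rw [PySem.List.mem_pyRange_one] at hi
      omega
    · rintro ⟨k, hk, -⟩
      omega

theorem Qany_iff (t : List Char) : (Q t).any isAbbaA = true ↔
    ∃ k : Nat, k < t.length - 3 ∧
      (t.getD k ' ' = t.getD (k+3) ' ' ∧ t.getD (k+1) ' ' = t.getD (k+2) ' ' ∧
       t.getD k ' ' ≠ t.getD (k+1) ' ') := by
  rw [List.any_eq_true]
  constructor
  · rintro ⟨x, hx, habba⟩
    rw [List.mem_iff_getElem?] at hx
    obtain ⟨k, hk⟩ := hx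
    have hklen : k < (Q t).length := (List.getElem?_eq_some_iff.mp hk).1
    rw [Q_length] at hklen
    rw [Q_getElem? t k (by omega)] at hk
    have hx : x = [t.getD k ' ', t.getD (k+1) ' ', t.getD (k+2) ' ', t.getD (k+3) ' '] :=
      (Option.some_injective _ hk).symm
    rw [hx, isAbbaA_quad, decide_eq_true_eq] at habba
    exact ⟨k, hklen, habba⟩
  · rintro ⟨k, hk, hcond⟩
    refine ⟨[t.getD k ' ', t.getD (k+1) ' ', t.getD (k+2) ' ', t.getD (k+3) ' '], ?_, ?_⟩
    · rw [List.mem_iff_getElem?]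
      exact ⟨k, Q_getElem? t k (by omega)⟩
    · rw [isAbbaA_quad, decide_eq_true_eq]
      exact hcond

theorem anyQ (t : List Char) : (Q t).any isAbbaA = hasAbba t := by
  cases h1 : (Q t).any isAbbaA <;> cases h2 : hasAbba t
  · rfl
  · exact absurd ((Qany_iff t).mpr ((hasAbba_iff t).mp h2)) (by simp [h1])
  · exact absurd ((hasAbba_iff t).mpr ((Qany_iff t).mp h1)) (by simp [h2])
  · rfl

theorem innerTrue_eq (sets : List (List Char)) (b : Bool) :
    innerTrue b sets = (b || sets.any isAbbaA) := by
  induction sets generalizing b with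
  | nil => simp [innerTrue]
  | cons s rest ih => by_cases h : isAbbaA s <;> simp [innerTrue, h, ih]

theorem innerFalse_eq (sets : List (List Char)) (b : Bool) :
    innerFalse b sets = (b && !sets.any isAbbaA) := by
  induction sets generalizing b with
  | nil => simp [innerFalse]
  | cons s rest ih => by_cases h : isAbbaA s <;> simp [innerFalse, h, ih]

-- the shared segmentation: (pending supernets, hypernets, final text)
def gh : List Char → List Char → List (List Char) × List (List Char) × List Char
  | [], t => ([], [], t)
  | c :: cs, t =>
      if c = '[' then
        let r := gh cs []
        (t :: r.1, r.2.1, r.2.2)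
      else if c = ']' then
        let r := gh cs []
        (r.1, t :: r.2.1, r.2.2)
      else gh cs (t ++ [c])

theorem fold_gh (cs : List Char) : ∀ (t : List Char) (hs ns : List (List Char)),
    cs.foldl ghStep (hs, ns, t) = (hs ++ (gh cs t).2.1, ns ++ (gh cs t).1, (gh cs t).2.2) := by
  induction cs with
  | nil => intro t hs ns; simp [gh]
  | cons c cs ih =>
      intro t hs ns
      by_cases h1 : c = '['
      · simp [gh, ghStep, h1, ih]
      · by_cases h2 : c = ']' <;> simp [gh, ghStep, h1, h2, ih]

theorem scan_eq (cs : List Char) : ∀ (ok : Bool) (seg : List Char),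
    tlsScan ok seg cs =
      ((ok || (gh cs seg).1.any hasAbba || hasAbba (gh cs seg).2.2) && !((gh cs seg).2.1.any hasAbba)) := by
  induction cs with
  | nil => intro ok seg; simp [tlsScan, gh]
  | cons c cs ih =>
      intro ok seg
      by_cases h1 : c = '['
      · simp [tlsScan, gh, h1, ih, Bool.or_assoc]
      · by_cases h2 : c = ']'
        · by_cases hs : hasAbba seg <;> simp [tlsScan, gh, h2, hs, ih]
        · simp [tlsScan, gh, h1, h2, ih]

theorem foldl_or_any (l : List (List Char)) : ∀ (b : Bool),
    l.foldl (fun b t => b || hasAbba t) b = (b || l.any hasAbba) := by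
  induction l with
  | nil => simp
  | cons x xs ih => intro b; simp [ih, Bool.or_assoc]

theorem foldl_and_not_any (l : List (List Char)) : ∀ (b : Bool),
    l.foldl (fun b t => b && !hasAbba t) b = (b && !l.any hasAbba) := by
  induction l with
  | nil => simp
  | cons x xs ih => intro b; simp [ih, Bool.and_assoc]

-- ===== VERDICT (by name: the statement is the Claim_ definition above) =====
theorem supports_tls_spec : Claim_equal_supports_tls := by
  intro inp _
  unfold Spec_supports_tls supports_tls supports_tls_alt getHypernetSequences
  rw [fold_gh inp.toList [] [] []]
  rw [scan_eq inp.toList false []]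
  simp only [List.nil_append]
  have hf1 : (fun (b : Bool) (t : List Char) => innerTrue b (getSets4 t)) =
      (fun b t => b || hasAbba t) := by
    funext b t; rw [innerTrue_eq, getSets4_eq_Q, anyQ]
  have hf2 : (fun (b : Bool) (t : List Char) => innerFalse b (getSets4 t)) =
      (fun b t => b && !hasAbba t) := by
    funext b t; rw [innerFalse_eq, getSets4_eq_Q, anyQ]
  rw [hf1, hf2, foldl_and_not_any, foldl_or_any]
  simp
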